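-- pv_equiv track=rewrite | github.com/manassanjaymishra24/Retail-analytics-pro | app.py | auto_detect_schema
-- ===== SOURCE A (Python) =====
-- from typing import Dict, List, Optional, Tuple
--
-- STANDARD_SCHEMA = [
--     'product_id',
--     'product_name',
--     'category',
--     'date',
--     'unit_price',
--     'quantity_sold',
--     'revenue'
-- ]
--
-- SCHEMA_SYNONYMS = {
--     'product_id': ['product_id', 'productid', 'sku', 'item_id', 'itemid', 'id'],
--     'product_name': ['product_name', 'product', 'item', 'item_name', 'productname', 'name'],
--     'category': ['category', 'cat', 'product_category', 'item_category', 'department', 'segment'],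
--     'date': ['date', 'order_date', 'sales_date', 'transaction_date', 'timestamp', 'day'],
--     'unit_price': ['unit_price', 'price', 'unitprice', 'unit_cost', 'unit_price_usd'],
--     'quantity_sold': ['quantity_sold', 'quantity', 'qty', 'units', 'units_sold', 'qty_sold'],
--     'revenue': ['revenue', 'sales', 'total', 'total_sales', 'sales_amount', 'amount']
-- }
--
-- def _normalize_column_name(name: str) -> str:
--     return name.strip().lower().replace(" ", "_")
--
-- def auto_detect_schema(columns: List[str]) -> Tuple[Dict[str, str], List[str]]:
--     normalized = {_normalize_column_name(c): c for c in columns}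
--     mapping: Dict[str, str] = {}
--     missing: List[str] = []
--
--     for standard_col in STANDARD_SCHEMA:
--         candidates = SCHEMA_SYNONYMS.get(standard_col, [standard_col])
--         match = None
--         for candidate in candidates:
--             key = _normalize_column_name(candidate)
--             if key in normalized:
--                 match = normalized[key]
--                 break
--         if match:
--             mapping[standard_col] = match
--         else:
--             missing.append(standard_col)
--
--     return mapping, missing
-- ===== SOURCE B (Python) =====
-- from typing import Dict, List, Tuple
--
-- STANDARD_SCHEMA = [
--     'product_id',
--     'product_name',
--     'category',
--     'date',
--     'unit_price',
--     'quantity_sold',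
--     'revenue'
-- ]
--
-- SCHEMA_SYNONYMS = {
--     'product_id': ['product_id', 'productid', 'sku', 'item_id', 'itemid', 'id'],
--     'product_name': ['product_name', 'product', 'item', 'item_name', 'productname', 'name'],
--     'category': ['category', 'cat', 'product_category', 'item_category', 'department', 'segment'],
--     'date': ['date', 'order_date', 'sales_date', 'transaction_date', 'timestamp', 'day'],
--     'unit_price': ['unit_price', 'price', 'unitprice', 'unit_cost', 'unit_price_usd'],
--     'quantity_sold': ['quantity_sold', 'quantity', 'qty', 'units', 'units_sold', 'qty_sold'],
--     'revenue': ['revenue', 'sales', 'total', 'total_sales', 'sales_amount', 'amount']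
-- }
--
-- def _normalize_column_name(name: str) -> str:
--     return name.strip().lower().replace(" ", "_")
--
-- # Inverted index: normalized synonym -> (standard column, priority = position in its list).
-- _SYN_INDEX: Dict[str, Tuple[str, int]] = {}
-- for _std, _syns in SCHEMA_SYNONYMS.items():
--     for _i, _syn in enumerate(_syns):
--         _key = _normalize_column_name(_syn)
--         if _key not in _SYN_INDEX:
--             _SYN_INDEX[_key] = (_std, _i)
--
-- def auto_detect_schema(columns: List[str]) -> Tuple[Dict[str, str], List[str]]:
--     normalized = {_normalize_column_name(c): c for c in columns}
--     best: Dict[str, Tuple[int, str]] = {}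
--     for key, col in normalized.items():
--         hit = _SYN_INDEX.get(key)
--         if hit is None:
--             continue
--         std, pri = hit
--         cur = best.get(std)
--         if cur is None or pri < cur[0]:
--             best[std] = (pri, col)
--     mapping: Dict[str, str] = {}
--     missing: List[str] = []
--     for std in STANDARD_SCHEMA:
--         if std in best:
--             mapping[std] = best[std][1]
--         else:
--             missing.append(std)
--     return mapping, missing
-- ===== Notes on version B (the rewrite author's own statement) =====
-- stated objective: alternative
-- what changed: A scans each standard column's synonym list against the normalized-columns dict (nested loops per standard column); B inverts SCHEMA_SYNONYMS once into a normalized-synonym -> (standard column, priority) index and makes a single pass over the normalized dict keeping the lowest-priority hit per standard column, then assembles mapping/missing in schema order.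
import Mathlib
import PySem

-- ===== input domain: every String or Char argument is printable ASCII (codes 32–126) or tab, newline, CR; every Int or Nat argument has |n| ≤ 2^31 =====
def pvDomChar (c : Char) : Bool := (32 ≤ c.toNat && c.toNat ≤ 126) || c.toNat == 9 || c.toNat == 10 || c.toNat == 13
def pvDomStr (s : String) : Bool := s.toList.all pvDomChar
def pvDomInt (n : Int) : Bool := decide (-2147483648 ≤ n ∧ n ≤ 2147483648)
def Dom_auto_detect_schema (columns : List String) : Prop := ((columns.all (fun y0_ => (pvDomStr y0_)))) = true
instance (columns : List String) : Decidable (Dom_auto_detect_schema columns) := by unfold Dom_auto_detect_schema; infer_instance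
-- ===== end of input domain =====

set_option maxRecDepth 8192
set_option maxHeartbeats 1000000


-- B replaces A's per-standard-column scan over synonym lists by a single pass over the
-- normalized-columns dict against a precomputed inverted synonym index (objective: alternative).

-- ===== PORT A =====
def pvNorm (s : String) : String := PySem.Str.replace (PySem.Str.lower (PySem.Str.strip s)) " " "_"

def pvSchema : List String :=
  ["product_id", "product_name", "category", "date", "unit_price", "quantity_sold", "revenue"]

def pvSyn : PySem.Dict String (List String) := PySem.Dict.ofList
  [("product_id", ["product_id", "productid", "sku", "item_id", "itemid", "id"]),
   ("product_name", ["product_name", "product", "item", "item_name", "productname", "name"]),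
   ("category", ["category", "cat", "product_category", "item_category", "department", "segment"]),
   ("date", ["date", "order_date", "sales_date", "transaction_date", "timestamp", "day"]),
   ("unit_price", ["unit_price", "price", "unitprice", "unit_cost", "unit_price_usd"]),
   ("quantity_sold", ["quantity_sold", "quantity", "qty", "units", "units_sold", "qty_sold"]),
   ("revenue", ["revenue", "sales", "total", "total_sales", "sales_amount", "amount"])]

-- the dict comprehension {norm(c): c for c in columns} (shared verbatim by A and B)
def pvNormalized (columns : List String) : PySem.Dict String String :=
  columns.foldl (fun d c => d.insert (pvNorm c) c) PySem.Dict.empty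

-- A's inner 'for candidate in candidates: … break' loop
def pvFirstMatch (d : PySem.Dict String String) : List String → Option String
  | [] => none
  | c :: rest =>
    match d.get? (pvNorm c) with
    | some v => some v
    | none => pvFirstMatch d rest

def auto_detect_schema (columns : List String) : (List (String × String)) × List String :=
  let normalized := pvNormalized columns
  let res := pvSchema.foldl
    (fun (acc : PySem.Dict String String × List String) std =>
      let candidates := (pvSyn.get? std).getD [std]
      match pvFirstMatch normalized candidates with
      | some v => if v = "" then (acc.1, acc.2 ++ [std]) else (acc.1.insert std v, acc.2)
      | none => (acc.1, acc.2 ++ [std]))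
    (PySem.Dict.empty, [])
  (res.1.items, res.2)

-- ===== PORT B =====
-- module-level inverted index: normalized synonym -> (standard column, priority)
def pvSynIndex : PySem.Dict String (String × Int) :=
  pvSyn.items.foldl
    (fun idx p =>
      (PySem.List.enumerate p.2 0).foldl
        (fun idx iq =>
          let key := pvNorm iq.2
          if idx.contains key then idx else idx.insert key (p.1, iq.1))
        idx)
    PySem.Dict.empty

-- the body of B's single pass over normalized.items()
def pvBestStep (b : PySem.Dict String (Int × String)) (kv : String × String) :
    PySem.Dict String (Int × String) :=
  match pvSynIndex.get? kv.1 with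
  | none => b
  | some hit =>
    match b.get? hit.1 with
    | none => b.insert hit.1 (hit.2, kv.2)
    | some cur => if hit.2 < cur.1 then b.insert hit.1 (hit.2, kv.2) else b

def auto_detect_schema_alt (columns : List String) : (List (String × String)) × List String :=
  let normalized := pvNormalized columns
  let best := normalized.items.foldl pvBestStep PySem.Dict.empty
  let res := pvSchema.foldl
    (fun (acc : PySem.Dict String String × List String) std =>
      match best.get? std with
      | some pv => (acc.1.insert std pv.2, acc.2)
      | none => (acc.1, acc.2 ++ [std]))
    (PySem.Dict.empty, [])
  (res.1.items, res.2)

-- ===== PRECONDITION & SPEC =====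
def Spec_auto_detect_schema (columns : List String) (out : (List (String × String)) × List String) : Prop := out = auto_detect_schema_alt columns
instance (columns : List String) (out : (List (String × String)) × List String) : Decidable (Spec_auto_detect_schema columns out) := by unfold Spec_auto_detect_schema; infer_instance

-- ===== CLAIM (what is proved, stated in full; the proofs are below) =====
def Claim_equal_auto_detect_schema : Prop := ∀ (columns : List String), Dom_auto_detect_schema columns → Spec_auto_detect_schema columns (auto_detect_schema columns)

-- ===== LEMMAS AND PROOFS =====

-- the inverted index, evaluated once to a literal (kernel evaluation of the build loop)
def pvSynIndexLit : PySem.Dict String (String × Int) := PySem.Dict.mk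
  [("product_id", ("product_id", 0)), ("productid", ("product_id", 1)), ("sku", ("product_id", 2)),
   ("item_id", ("product_id", 3)), ("itemid", ("product_id", 4)), ("id", ("product_id", 5)),
   ("product_name", ("product_name", 0)), ("product", ("product_name", 1)), ("item", ("product_name", 2)),
   ("item_name", ("product_name", 3)), ("productname", ("product_name", 4)), ("name", ("product_name", 5)),
   ("category", ("category", 0)), ("cat", ("category", 1)), ("product_category", ("category", 2)),
   ("item_category", ("category", 3)), ("department", ("category", 4)), ("segment", ("category", 5)),
   ("date", ("date", 0)), ("order_date", ("date", 1)), ("sales_date", ("date", 2)),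
   ("transaction_date", ("date", 3)), ("timestamp", ("date", 4)), ("day", ("date", 5)),
   ("unit_price", ("unit_price", 0)), ("price", ("unit_price", 1)), ("unitprice", ("unit_price", 2)),
   ("unit_cost", ("unit_price", 3)), ("unit_price_usd", ("unit_price", 4)),
   ("quantity_sold", ("quantity_sold", 0)), ("quantity", ("quantity_sold", 1)), ("qty", ("quantity_sold", 2)),
   ("units", ("quantity_sold", 3)), ("units_sold", ("quantity_sold", 4)), ("qty_sold", ("quantity_sold", 5)),
   ("revenue", ("revenue", 0)), ("sales", ("revenue", 1)), ("total", ("revenue", 2)),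
   ("total_sales", ("revenue", 3)), ("sales_amount", ("revenue", 4)), ("amount", ("revenue", 5))]

lemma pvSynIndex_eq : pvSynIndex = pvSynIndexLit := by decide

-- first-match association-list lookup (what Dict.get? computes on d.items)
def pvLook (k : String) : List (String × String) → Option String
  | [] => none
  | (k', v) :: t => if k' = k then some v else pvLook k t

lemma pvGet?_eq_look (d : PySem.Dict String String) (k : String) :
    d.get? k = pvLook k d.items := by
  suffices h : ∀ l : List (String × String), (PySem.Dict.mk l).get? k = pvLook k l from h d.items
  intro l
  induction l with
  | nil => rfl
  | cons p t ih =>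
    obtain ⟨k', v⟩ := p
    rw [PySem.Dict.get?_mk_cons]
    simp only [pvLook, beq_iff_eq, ih]

lemma pvLook_eq_none_of_not_mem (k : String) :
    ∀ t : List (String × String), k ∉ t.map Prod.fst → pvLook k t = none := by
  intro t
  induction t with
  | nil => intro _; rfl
  | cons p s ih =>
    obtain ⟨k', w⟩ := p
    intro h
    simp only [List.map_cons, List.mem_cons, not_or] at h
    simp only [pvLook, if_neg (fun he : k' = k => h.1 he.symm)]
    exact ih h.2

-- left-biased minimum-priority merge (what one step of B's pass does to one best-entry)
def pvCombine (o h : Option (Int × String)) : Option (Int × String) :=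
  match o, h with
  | none, h => h
  | some a, none => some a
  | some a, some b => if b.1 < a.1 then some b else some a

lemma pvCombine_none_right (o : Option (Int × String)) : pvCombine o none = o := by
  cases o <;> rfl

lemma pvCombine_none_left (h : Option (Int × String)) : pvCombine none h = h := by
  cases h <;> rfl

lemma pvCombine_some_some (a b : Int × String) :
    pvCombine (some a) (some b) = if b.1 < a.1 then some b else some a := rfl

lemma pvCombine_assoc (a b c : Option (Int × String)) :
    pvCombine (pvCombine a b) c = pvCombine a (pvCombine b c) := by
  rcases a with _ | a
  · rw [pvCombine_none_left, pvCombine_none_left]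
  · rcases b with _ | b
    · rw [pvCombine_none_right, pvCombine_none_left]
    · rcases c with _ | c
      · rw [pvCombine_none_right, pvCombine_none_right]
      · rw [pvCombine_some_some a b, pvCombine_some_some b c]
        split_ifs <;> (try simp only [pvCombine_some_some]) <;>
          (try split_ifs) <;> first | rfl | (exfalso; omega)

def pvHit (std : String) (kv : String × String) : Option (Int × String) :=
  match pvSynIndex.get? kv.1 with
  | some sp => if sp.1 = std then some (sp.2, kv.2) else none
  | none => none

def pvSStep (std : String) (o : Option (Int × String)) (kv : String × String) :
    Option (Int × String) := pvCombine o (pvHit std kv)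

lemma pvSStep_none (std : String) (kv : String × String) :
    pvSStep std none kv = pvHit std kv := pvCombine_none_left _

lemma pvBestStep_get? (std : String) (b : PySem.Dict String (Int × String))
    (kv : String × String) :
    (pvBestStep b kv).get? std = pvSStep std (b.get? std) kv := by
  unfold pvBestStep pvSStep
  cases hidx : pvSynIndex.get? kv.1 with
  | none =>
    have hhit : pvHit std kv = none := by simp [pvHit, hidx]
    rw [hhit, pvCombine_none_right]
  | some sp =>
    obtain ⟨s, p⟩ := sp
    by_cases hstd : s = std
    · subst hstd
      have hhit : pvHit s kv = some (p, kv.2) := by simp [pvHit, hidx]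
      rw [hhit]
      cases hb : b.get? s with
      | none =>
        simp only [hb]
        rw [PySem.Dict.get?_insert_self]
        rfl
      | some cur =>
        simp only [hb, pvCombine]
        split_ifs with h
        · rw [PySem.Dict.get?_insert_self]
        · exact hb
    · have hhit : pvHit std kv = none := by simp [pvHit, hidx, hstd]
      rw [hhit, pvCombine_none_right]
      have hne : std ≠ s := fun he => hstd he.symm
      cases hb : b.get? s with
      | none =>
        simp only [hb]
        rw [PySem.Dict.get?_insert_of_ne]
        exact hne
      | some cur =>
        simp only [hb]
        split_ifs
        · rw [PySem.Dict.get?_insert_of_ne]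
          exact hne
        · rfl

lemma pvFoldl_sstep_combine (std : String) (L : List (String × String)) :
    ∀ o, L.foldl (pvSStep std) o = pvCombine o (L.foldl (pvSStep std) none) := by
  induction L with
  | nil => intro o; rw [List.foldl_nil, List.foldl_nil, pvCombine_none_right]
  | cons x t ih =>
    intro o
    simp only [List.foldl_cons]
    rw [ih (pvSStep std o x), ih (pvSStep std none x), pvSStep_none]
    show pvCombine (pvCombine o (pvHit std x)) _ = _
    rw [pvCombine_assoc]

lemma pvFoldl_best_get? (std : String) (L : List (String × String)) :
    ∀ b : PySem.Dict String (Int × String),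
      (L.foldl pvBestStep b).get? std = L.foldl (pvSStep std) (b.get? std) := by
  induction L with
  | nil => intro b; rfl
  | cons x t ih =>
    intro b
    simp only [List.foldl_cons, ih, pvBestStep_get?]

-- the chain of lookups at the (normalized synonym, priority) pairs of one standard column
def pvChain (L : List (String × String)) : List (String × Int) → Option (Int × String)
  | [] => none
  | kp :: rest =>
    match pvLook kp.1 L with
    | some v => some (kp.2, v)
    | none => pvChain L rest

lemma pvChain_pri_mem (L : List (String × String)) (kps : List (String × Int))
    (p : Int) (v : String) (h : pvChain L kps = some (p, v)) :
    p ∈ kps.map Prod.snd := by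
  induction kps with
  | nil => simp [pvChain] at h
  | cons kp rest ih =>
    simp only [pvChain] at h
    cases hl : pvLook kp.1 L with
    | some w => rw [hl] at h; simp_all
    | none => rw [hl] at h; simp [ih h]

lemma pvChain_cons (std : String) (k v : String) (t : List (String × String)) :
    ∀ kps : List (String × Int),
      (∀ kp ∈ kps, pvSynIndex.get? kp.1 = some (std, kp.2)) →
      kps.Pairwise (fun a b => a.2 < b.2) →
      (∀ p', pvSynIndex.get? k = some (std, p') → (k, p') ∈ kps) →
      pvLook k t = none →
      pvChain ((k, v) :: t) kps = pvCombine (pvHit std (k, v)) (pvChain t kps) := by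
  intro kps
  induction kps with
  | nil =>
    intro _ _ hk _
    show none = pvCombine (pvHit std (k, v)) none
    rw [pvCombine_none_right]
    cases hidx : pvSynIndex.get? k with
    | none => simp [pvHit, hidx]
    | some sp =>
      obtain ⟨s, p⟩ := sp
      by_cases hs : s = std
      · subst hs; exact absurd (hk p hidx) (List.not_mem_nil)
      · simp [pvHit, hidx, hs]
  | cons kp rest ih =>
    intro hks hsorted hk hlt
    obtain ⟨k0, p0⟩ := kp
    by_cases hk0 : k0 = k
    · subst hk0
      have hidx : pvSynIndex.get? k0 = some (std, p0) := hks (k0, p0) (by simp)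
      have hchaint : pvChain t ((k0, p0) :: rest) = pvChain t rest := by
        simp [pvChain, hlt]
      have hup : pvChain ((k0, v) :: t) ((k0, p0) :: rest) = some (p0, v) := by
        simp [pvChain, pvLook]
      have hhit : pvHit std (k0, v) = some (p0, v) := by simp [pvHit, hidx]
      rw [hup, hchaint, hhit]
      cases hc : pvChain t rest with
      | none => rfl
      | some pw =>
        obtain ⟨p', w⟩ := pw
        have hmem : p' ∈ rest.map Prod.snd := pvChain_pri_mem t rest p' w hc
        have hgt : p0 < p' := by
          simp only [List.mem_map] at hmem
          obtain ⟨b, hb, hbe⟩ := hmem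
          have := (List.pairwise_cons.mp hsorted).1 b hb
          omega
        simp [pvCombine, not_lt.mpr (le_of_lt hgt)]
    · have hlook : pvLook k0 ((k, v) :: t) = pvLook k0 t := by
        simp only [pvLook, if_neg (fun he : k = k0 => hk0 he.symm)]
      cases hl : pvLook k0 t with
      | some v0 =>
        have hup : pvChain ((k, v) :: t) ((k0, p0) :: rest) = some (p0, v0) := by
          simp [pvChain, hlook, hl]
        have hdn : pvChain t ((k0, p0) :: rest) = some (p0, v0) := by
          simp [pvChain, hl]
        rw [hup, hdn]
        cases hidx : pvSynIndex.get? k with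
        | none =>
          have hhit : pvHit std (k, v) = none := by simp [pvHit, hidx]
          rw [hhit, pvCombine_none_left]
        | some sp =>
          obtain ⟨s, p⟩ := sp
          by_cases hs : s = std
          · subst hs
            have hhit : pvHit s (k, v) = some (p, v) := by simp [pvHit, hidx]
            have hmem : (k, p) ∈ (k0, p0) :: rest := hk p hidx
            have hmem' : (k, p) ∈ rest := by
              rcases List.mem_cons.mp hmem with h | h
              · exfalso; rw [Prod.mk.injEq] at h; exact hk0 h.1.symm
              · exact h
            have hgt : p0 < p := by
              have := (List.pairwise_cons.mp hsorted).1 (k, p) hmem'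
              simpa using this
            rw [hhit]
            simp [pvCombine, hgt]
          · have hhit : pvHit std (k, v) = none := by simp [pvHit, hidx, hs]
            rw [hhit, pvCombine_none_left]
      | none =>
        have h1 : pvChain ((k, v) :: t) ((k0, p0) :: rest) = pvChain ((k, v) :: t) rest := by
          simp [pvChain, hlook, hl]
        have h2 : pvChain t ((k0, p0) :: rest) = pvChain t rest := by
          simp [pvChain, hl]
        rw [h1, h2]
        refine ih (fun kp h => hks kp (List.mem_cons_of_mem _ h))
          (List.pairwise_cons.mp hsorted).2 (fun p' hp' => ?_) hlt
        rcases List.mem_cons.mp (hk p' hp') with h | h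
        · exfalso; rw [Prod.mk.injEq] at h; exact hk0 h.1.symm
        · exact h

lemma pvChain_nil_left (kps : List (String × Int)) : pvChain [] kps = none := by
  induction kps with
  | nil => rfl
  | cons kp rest ih => simp [pvChain, pvLook, ih]

lemma pvBest_eq_chain (std : String) (kps : List (String × Int))
    (hks : ∀ kp ∈ kps, pvSynIndex.get? kp.1 = some (std, kp.2))
    (hfull : ∀ kv ∈ pvSynIndex.items, kv.2.1 = std → (kv.1, kv.2.2) ∈ kps)
    (hsorted : kps.Pairwise (fun a b => a.2 < b.2)) :
    ∀ L : List (String × String), (L.map Prod.fst).Nodup →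
      L.foldl (pvSStep std) none = pvChain L kps := by
  intro L
  induction L with
  | nil => intro _; simp only [List.foldl_nil, pvChain_nil_left]
  | cons x t ih =>
    intro hnd
    obtain ⟨k, v⟩ := x
    simp only [List.map_cons, List.nodup_cons] at hnd
    obtain ⟨hknot, hnd'⟩ := hnd
    have hkt : pvLook k t = none := pvLook_eq_none_of_not_mem k t hknot
    have hk : ∀ p', pvSynIndex.get? k = some (std, p') → (k, p') ∈ kps := by
      intro p' hp'
      refine hfull (k, (std, p')) ?_ rfl
      apply PySem.Dict.mem_items_of_get?_eq_some
      exact hp'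
    rw [List.foldl_cons, pvFoldl_sstep_combine, ih hnd', pvSStep_none,
      pvChain_cons std k v t kps hks hsorted hk hkt]

-- first present key of a chain, forgetting priorities
def pvFirstLook (L : List (String × String)) : List String → Option String
  | [] => none
  | k :: rest =>
    match pvLook k L with
    | some v => some v
    | none => pvFirstLook L rest

lemma pvChain_map_snd (L : List (String × String)) (kps : List (String × Int)) :
    (pvChain L kps).map (·.2) = pvFirstLook L (kps.map Prod.fst) := by
  induction kps with
  | nil => rfl
  | cons kp rest ih =>
    simp only [pvChain, List.map_cons, pvFirstLook]
    cases hl : pvLook kp.1 L <;> simp [ih]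

lemma pvFirstMatch_eq_firstLook (d : PySem.Dict String String) (cands : List String) :
    pvFirstMatch d cands = pvFirstLook d.items (cands.map pvNorm) := by
  induction cands with
  | nil => rfl
  | cons c rest ih =>
    simp only [pvFirstMatch, List.map_cons, pvFirstLook]
    rw [pvGet?_eq_look, ih]

-- the master per-standard-column fact
lemma pvPerStd (std : String) (cands : List String) (kps : List (String × Int))
    (hks : ∀ kp ∈ kps, pvSynIndex.get? kp.1 = some (std, kp.2))
    (hfull : ∀ kv ∈ pvSynIndex.items, kv.2.1 = std → (kv.1, kv.2.2) ∈ kps)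
    (hsorted : kps.Pairwise (fun a b => a.2 < b.2))
    (hcands : cands.map pvNorm = kps.map Prod.fst)
    (d : PySem.Dict String String) (hnd : (d.items.map Prod.fst).Nodup) :
    pvFirstMatch d cands = ((d.items.foldl pvBestStep PySem.Dict.empty).get? std).map (·.2) := by
  rw [pvFirstMatch_eq_firstLook, hcands, pvFoldl_best_get?, PySem.Dict.get?_empty,
    pvBest_eq_chain std kps hks hfull hsorted d.items hnd, pvChain_map_snd]

lemma pvNormalized_nodup (columns : List String) :
    ((pvNormalized columns).items.map Prod.fst).Nodup :=
  PySem.Dict.nodup_keys_foldl_insert_key columns pvNorm (fun _ c => c) PySem.Dict.empty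
    PySem.Dict.nodup_keys_empty

-- a first match is never the empty string: every value of the normalized dict
-- re-normalizes to its key, and no normalized synonym is the empty string
lemma pvNorm_empty : pvNorm "" = "" := by decide

lemma pvNormalized_get_inv (columns : List String) :
    ∀ k v, (pvNormalized columns).get? k = some v → pvNorm v = k := by
  unfold pvNormalized
  suffices hh : ∀ (cs : List String) (d : PySem.Dict String String),
      (∀ k v, d.get? k = some v → pvNorm v = k) →
      ∀ k v, (cs.foldl (fun d c => d.insert (pvNorm c) c) d).get? k = some v → pvNorm v = k by
    refine hh columns PySem.Dict.empty (fun k v hkv => ?_)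
    rw [PySem.Dict.get?_empty] at hkv
    exact nomatch hkv
  intro cs
  induction cs with
  | nil => intro d hd; exact hd
  | cons c rest ih =>
    intro d hd
    rw [List.foldl_cons]
    refine ih _ (fun k v hkv => ?_)
    by_cases hk : k = pvNorm c
    · subst hk
      rw [PySem.Dict.get?_insert_self] at hkv
      rw [← Option.some.inj hkv]
    · rw [PySem.Dict.get?_insert_of_ne _ _ hk] at hkv
      exact hd k v hkv

lemma pvFirstMatch_ne_empty (d : PySem.Dict String String)
    (hd : ∀ k v, d.get? k = some v → pvNorm v = k) (cands : List String)
    (hc : ∀ c ∈ cands, pvNorm c ≠ "") (v : String)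
    (h : pvFirstMatch d cands = some v) : v ≠ "" := by
  induction cands with
  | nil => rw [pvFirstMatch] at h; exact nomatch h
  | cons c rest ih =>
    rw [pvFirstMatch] at h
    cases hl : d.get? (pvNorm c) with
    | some w =>
      rw [hl] at h
      have hw : w = v := Option.some.inj h
      have hkey : pvNorm w = pvNorm c := hd _ _ hl
      intro hve
      rw [hw, hve] at hkey
      exact hc c List.mem_cons_self (hkey.symm.trans pvNorm_empty)
    | none =>
      rw [hl] at h
      exact ih (fun c' hc' => hc c' (List.mem_cons_of_mem _ hc')) h

-- the two assembly folds over the schema agree, given per-column agreement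
lemma pvAssemble (n : PySem.Dict String String) (best : PySem.Dict String (Int × String)) :
    ∀ (SL : List String) (acc : PySem.Dict String String × List String),
      (∀ std ∈ SL,
        pvFirstMatch n ((pvSyn.get? std).getD [std]) = (best.get? std).map (·.2)) →
      (∀ std ∈ SL, ∀ v, pvFirstMatch n ((pvSyn.get? std).getD [std]) = some v → v ≠ "") →
      SL.foldl
        (fun (acc : PySem.Dict String String × List String) std =>
          match pvFirstMatch n ((pvSyn.get? std).getD [std]) with
          | some v => if v = "" then (acc.1, acc.2 ++ [std]) else (acc.1.insert std v, acc.2)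
          | none => (acc.1, acc.2 ++ [std])) acc =
      SL.foldl
        (fun (acc : PySem.Dict String String × List String) std =>
          match best.get? std with
          | some pv => (acc.1.insert std pv.2, acc.2)
          | none => (acc.1, acc.2 ++ [std])) acc := by
  intro SL
  induction SL with
  | nil => intro _ _ _; rfl
  | cons std rest ih =>
    intro acc hEq hNe
    simp only [List.foldl_cons]
    have hstd := hEq std (by simp)
    have hstep :
        (match pvFirstMatch n ((pvSyn.get? std).getD [std]) with
          | some v => if v = "" then (acc.1, acc.2 ++ [std]) else (acc.1.insert std v, acc.2)
          | none => (acc.1, acc.2 ++ [std])) =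
        (match best.get? std with
          | some pv => (acc.1.insert std pv.2, acc.2)
          | none => (acc.1, acc.2 ++ [std])) := by
      cases hb : best.get? std with
      | none => rw [hb] at hstd; simp [hstd]
      | some pv =>
        rw [hb] at hstd
        simp only [Option.map_some] at hstd
        have hne := hNe std (by simp) pv.2 hstd
        simp [hstd, hne]
    rw [hstep]
    exact ih _ (fun s hs => hEq s (by simp [hs])) (fun s hs => hNe s (by simp [hs]))

-- per-column instantiations: the (normalized synonym, priority) tables of the seven columns
lemma pvPerSchema (columns : List String) (std : String) (hstd : std ∈ pvSchema) :
    pvFirstMatch (pvNormalized columns) ((pvSyn.get? std).getD [std]) =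
      (((pvNormalized columns).items.foldl pvBestStep PySem.Dict.empty).get? std).map (·.2) := by
  have hnd := pvNormalized_nodup columns
  fin_cases hstd
  · exact pvPerStd _ _ [("product_id", 0), ("productid", 1), ("sku", 2), ("item_id", 3),
      ("itemid", 4), ("id", 5)] (by rw [pvSynIndex_eq]; decide) (by rw [pvSynIndex_eq]; decide)
      (by decide) (by decide) _ hnd
  · exact pvPerStd _ _ [("product_name", 0), ("product", 1), ("item", 2), ("item_name", 3),
      ("productname", 4), ("name", 5)] (by rw [pvSynIndex_eq]; decide) (by rw [pvSynIndex_eq]; decide)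
      (by decide) (by decide) _ hnd
  · exact pvPerStd _ _ [("category", 0), ("cat", 1), ("product_category", 2),
      ("item_category", 3), ("department", 4), ("segment", 5)] (by rw [pvSynIndex_eq]; decide)
      (by rw [pvSynIndex_eq]; decide) (by decide) (by decide) _ hnd
  · exact pvPerStd _ _ [("date", 0), ("order_date", 1), ("sales_date", 2),
      ("transaction_date", 3), ("timestamp", 4), ("day", 5)] (by rw [pvSynIndex_eq]; decide)
      (by rw [pvSynIndex_eq]; decide) (by decide) (by decide) _ hnd
  · exact pvPerStd _ _ [("unit_price", 0), ("price", 1), ("unitprice", 2), ("unit_cost", 3),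
      ("unit_price_usd", 4)] (by rw [pvSynIndex_eq]; decide) (by rw [pvSynIndex_eq]; decide)
      (by decide) (by decide) _ hnd
  · exact pvPerStd _ _ [("quantity_sold", 0), ("quantity", 1), ("qty", 2), ("units", 3),
      ("units_sold", 4), ("qty_sold", 5)] (by rw [pvSynIndex_eq]; decide)
      (by rw [pvSynIndex_eq]; decide) (by decide) (by decide) _ hnd
  · exact pvPerStd _ _ [("revenue", 0), ("sales", 1), ("total", 2), ("total_sales", 3),
      ("sales_amount", 4), ("amount", 5)] (by rw [pvSynIndex_eq]; decide)
      (by rw [pvSynIndex_eq]; decide) (by decide) (by decide) _ hnd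

lemma pvSchema_cands_ne_empty (std : String) (hstd : std ∈ pvSchema) :
    ∀ c ∈ (pvSyn.get? std).getD [std], pvNorm c ≠ "" := by
  fin_cases hstd <;> decide

-- ===== VERDICT (by name: the statement is the Claim_ definition above) =====
theorem auto_detect_schema_spec : Claim_equal_auto_detect_schema := by
  intro columns _
  unfold Spec_auto_detect_schema auto_detect_schema auto_detect_schema_alt
  simp only
  rw [pvAssemble (pvNormalized columns)
      ((pvNormalized columns).items.foldl pvBestStep PySem.Dict.empty) pvSchema
      (PySem.Dict.empty, [])
      (fun std hstd => pvPerSchema columns std hstd)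
      (fun std hstd v h =>
        pvFirstMatch_ne_empty (pvNormalized columns) (pvNormalized_get_inv columns) _
          (pvSchema_cands_ne_empty std hstd) v h)]
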